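-- pv_equiv track=rewrite | github.com/Hong9915/algorithm | BAEKJOON/1697.py | find_fastest_way
-- ===== SOURCE A (Python) =====
-- from collections import deque
--
-- def find_fastest_way(N, K):
--     if N>=K:
--         return N-K
--     queue = deque()
--     queue.append((N, 0))
--     visited = [False] * 100001
--
--     while queue:
--         now, time = queue.popleft()
--         if now == K:
--             return time
--         visited[now] = True
--
--         for next_step in [now - 1, now + 1, now * 2]:
--             if 0 <= next_step < 100001 and not visited[next_step]:
--                 queue.append((next_step, time + 1))
-- ===== SOURCE B (Python) =====
-- def find_fastest_way(N, K):
--     # Greedy/recursive arithmetic descent from K (O(log K)): instead of a BFS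
--     # over the whole 0..100000 board, work backward from K, halving when even.
--     if N >= K:
--         return N - K
--     def g(x):
--         # minimum number of moves from N to x (for 0 <= N < x)
--         if x <= N:
--             return N - x
--         if x == N + 1:
--             return 1
--         if x % 2 == 0:
--             return min(x - N, 1 + g(x // 2))
--         return 1 + min(g(x - 1), g(x + 1))
--     return g(K)
-- ===== Notes on version B (the rewrite author's own statement) =====
-- stated objective: faster
-- what changed: Replaces the forward BFS over the 100001-cell board with a recursive greedy descent backward from K (halve when even, resolve odd K via K-1/K+1), so the cost depends on log K instead of the board size.
-- outside the precondition, e.g. on find_fastest_way(0, 100001): A returns None, B returns 23; on find_fastest_way(-3, 5): A returns None, B raises RecursionError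
import Mathlib
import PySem

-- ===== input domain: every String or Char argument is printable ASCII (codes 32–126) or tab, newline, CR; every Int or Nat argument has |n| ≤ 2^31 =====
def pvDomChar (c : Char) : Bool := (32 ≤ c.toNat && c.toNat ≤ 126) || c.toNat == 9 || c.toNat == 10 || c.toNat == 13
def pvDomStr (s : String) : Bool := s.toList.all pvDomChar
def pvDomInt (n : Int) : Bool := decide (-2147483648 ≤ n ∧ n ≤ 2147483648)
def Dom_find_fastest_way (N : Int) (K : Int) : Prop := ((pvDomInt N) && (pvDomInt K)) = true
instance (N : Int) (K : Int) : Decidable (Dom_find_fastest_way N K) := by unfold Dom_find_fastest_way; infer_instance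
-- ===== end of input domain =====

-- B replaces A's board-wide BFS by a recursive greedy descent backward from K
-- (halve when even), an asymptotically faster exact algorithm; equivalence is
-- proved on Pre_ (the inputs where A returns its BFS answer and B terminates).

-- ===== PORT A =====

-- Python list assignment `visited[now] = True`: negative index wraps around
-- (exact for -100001 ≤ now ≤ 100000; within Pre_ only 0 ≤ now ≤ 100000 occurs).
def pvMark (vis : Array Bool) (now : Int) : Array Bool :=
  vis.setIfInBounds (if now < 0 then now + 100001 else now).toNat true

-- `for next_step in [now-1, now+1, now*2]: if 0 <= next_step < 100001 and not visited[next_step]`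
def pvNbrsA (now : Int) (vis : Array Bool) : List Int :=
  [now - 1, now + 1, now * 2].filter
    (fun s => decide (0 ≤ s) && decide (s < 100001) && !(vis.getD s.toNat false))

-- A's BFS loop; the deque is ported as the standard functional FIFO pair
-- (front, back with back reversed); the fuel is only a totality guard (one unit
-- per pop) and is proved sufficient on Pre_ below.
def bfsA (K : Int) : Nat → List (Int × Int) → List (Int × Int) → Array Bool → Option Int
  | 0, _, _, _ => none
  | _ + 1, [], [], _ => none
  | fuel + 1, [], b :: bs, vis => bfsA K (fuel + 1) ((b :: bs).reverse) [] vis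
  | fuel + 1, (now, time) :: f, back, vis =>
      if now = K then some time
      else
        let vis' := pvMark vis now
        bfsA K fuel f (((pvNbrsA now vis').map (fun s => (s, time + 1))).reverse ++ back) vis'
  termination_by fuel _front back _ => (fuel, back.length)

def find_fastest_way (N : Int) (K : Int) : Option Int :=
  if N ≥ K then some (N - K)
  else bfsA K (4 ^ 100002) [(N, 0)] [] (Array.replicate 100001 false)

-- ===== PORT B =====

-- Source B's nested recursive `g` (captures N); the fuel is only a totality guard
-- (Python has none and recurses freely) and is proved sufficient on Pre_ below.
def gB (N : Int) : Nat → Int → Option Int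
  | 0, _ => none
  | fuel + 1, x =>
      if x ≤ N then some (N - x)
      else if x = N + 1 then some 1
      else if x % 2 = 0 then
        (gB N fuel (x / 2)).map (fun r => min (x - N) (1 + r))
      else
        (gB N fuel (x - 1)).bind (fun r1 =>
          (gB N fuel (x + 1)).map (fun r2 => 1 + min r1 r2))

def find_fastest_way_alt (N : Int) (K : Int) : Option Int :=
  if N ≥ K then some (N - K)
  else gB N (2 * K + 6).toNat K

-- ===== PRECONDITION & SPEC =====

-- Pre_ excludes the inputs with N < K on which A's fixed 0..100000 board makes its
-- behaviour accidental and B's recursion does not terminate (Python RecursionError):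
-- N < 0 (A raises IndexError for N < -100001, else returns None or a wrap-around
-- artefact) and K > 100000 (off the board: A returns None, a defensible corner,
-- while B computes the unbounded distance).
def Pre_find_fastest_way (N : Int) (K : Int) : Prop :=
  K ≤ N ∨ (0 ≤ N ∧ K ≤ 100000)
instance (N : Int) (K : Int) : Decidable (Pre_find_fastest_way N K) := by
  unfold Pre_find_fastest_way; infer_instance

def pvWitness_find_fastest_way : Int × Int := (3, 10)

def Spec_find_fastest_way (N : Int) (K : Int) (out : Option Int) : Prop := out = find_fastest_way_alt N K
instance (N : Int) (K : Int) (out : Option Int) : Decidable (Spec_find_fastest_way N K out) := by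
  unfold Spec_find_fastest_way; infer_instance

-- ===== CLAIM (what is proved, stated in full; the proofs are below) =====
def Claim_equal_find_fastest_way : Prop := ∀ (N : Int) (K : Int), Dom_find_fastest_way N K → Pre_find_fastest_way N K → Spec_find_fastest_way N K (find_fastest_way N K)

-- ===== LEMMAS AND PROOFS =====

-- ---------- proof-side reference forms of A's loop ----------

-- plain single-queue form of bfsA
def bfsA' (K : Int) : Nat → List (Int × Int) → Array Bool → Option Int
  | 0, _, _ => none
  | _ + 1, [], _ => none
  | fuel + 1, (now, time) :: rest, vis =>
      if now = K then some time
      else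
        let vis' := pvMark vis now
        bfsA' K fuel (rest ++ (pvNbrsA now vis').map (fun s => (s, time + 1))) vis'

-- level-synchronous form (frontier, next frontier, level counter)
def bfsL (K : Int) : Nat → List Int → List Int → Int → Array Bool → Option Int
  | 0, _, _, _, _ => none
  | _ + 1, [], [], _, _ => none
  | fuel + 1, [], n :: ns, time, vis => bfsL K (fuel + 1) (n :: ns) [] (time + 1) vis
  | fuel + 1, now :: fr, nxt, time, vis =>
      if now = K then some time
      else
        let vis' := pvMark vis now
        bfsL K fuel fr (nxt ++ pvNbrsA now vis') time vis'
  termination_by fuel _fr nxt _ _ => (fuel, nxt.length)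

theorem bfsA_eq (K : Int) (fuel : Nat) (f b : List (Int × Int)) (vis : Array Bool) :
    bfsA K fuel f b vis = bfsA' K fuel (f ++ b.reverse) vis := by
  fun_induction bfsA K fuel f b vis with
  | case1 => rfl
  | case2 => rfl
  | case3 fuel b bs vis ih => simpa using ih
  | case4 => simp [bfsA']
  | case5 =>
      rename_i hK _vis' ih
      rw [ih]
      simp [bfsA', hK, List.reverse_append, List.append_assoc]
      rfl

theorem main_bisim (K : Int) (fuel : Nat) (fr nxt : List Int) (t : Int) (vis : Array Bool) :
    bfsA' K fuel (fr.map (fun s => (s, t)) ++ nxt.map (fun s => (s, t + 1))) vis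
      = bfsL K fuel fr nxt t vis := by
  fun_induction bfsL K fuel fr nxt t vis with
  | case1 =>
      rename_i fr nxt t vis
      cases fr <;> cases nxt <;> simp [bfsA']
  | case2 => simp [bfsA']
  | case3 =>
      rename_i n ns time vis ih
      rw [← ih]
      simp
  | case4 => simp [bfsA']
  | case5 =>
      rename_i hK _vis' ih
      rw [← ih]
      simp [bfsA', hK, List.append_assoc, List.map_append]
      rfl

-- ---------- reachability spec ----------

def stepR (x y : Int) : Prop :=
  (y = x - 1 ∨ y = x + 1 ∨ y = x * 2) ∧ 0 ≤ y ∧ y ≤ 100000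

inductive Reach (N : Int) : Nat → Int → Prop
  | zero : Reach N 0 N
  | stay {t x} : Reach N t x → Reach N (t + 1) x
  | succ {t x y} : Reach N t x → stepR x y → Reach N (t + 1) y

theorem reach_bounds {N : Int} (hN0 : 0 ≤ N) (hN1 : N ≤ 100000) {t : Nat} {x : Int}
    (h : Reach N t x) : 0 ≤ x ∧ x ≤ 100000 := by
  induction h with
  | zero => exact ⟨hN0, hN1⟩
  | stay _ ih => exact ih
  | succ _ hs _ => exact hs.2

theorem reach_stable {N : Int} {t : Nat}
    (h : ∀ y, Reach N (t + 1) y → Reach N t y) :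
    ∀ (s : Nat) (y : Int), Reach N (t + s) y → Reach N t y := by
  intro s
  induction s with
  | zero => intro y hy; exact hy
  | succ s ih =>
      intro y hy
      cases hy with
      | stay h' => exact ih _ h'
      | succ h' hs => exact h _ (Reach.succ (ih _ h') hs)

theorem reach_upwalk {N : Int} (hN0 : 0 ≤ N) :
    ∀ k : Nat, N + k ≤ 100000 → Reach N k (N + k) := by
  intro k
  induction k with
  | zero => intro _; simpa using Reach.zero
  | succ k ih =>
      intro hk
      have h1 : Reach N k (N + k) := ih (by push_cast at hk ⊢; omega)
      have : stepR (N + k) (N + (k+1)) := by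
        constructor
        · right; left; push_cast; ring
        · constructor
          · positivity
          · push_cast at hk ⊢; omega
      exact Reach.succ h1 this

theorem reach_downwalk {N : Int} (hN0 : 0 ≤ N) (hN1 : N ≤ 100000) :
    ∀ k : Nat, (k : Int) ≤ N → Reach N k (N - k) := by
  intro k
  induction k with
  | zero => intro _; simpa using Reach.zero
  | succ k ih =>
      intro hk
      have h1 : Reach N k (N - k) := ih (by push_cast at hk ⊢; omega)
      have : stepR (N - k) (N - (k+1)) := by
        constructor
        · left; push_cast; ring
        · constructor
          · push_cast at hk ⊢; omega
          · push_cast at hk ⊢; omega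
      exact Reach.succ h1 this

-- ---------- visited-array lemmas ----------

def visB (vis : Array Bool) (x : Int) : Bool := vis.getD x.toNat false

theorem size_pvMark (vis : Array Bool) (now : Int) :
    (pvMark vis now).size = vis.size := by
  simp [pvMark]

theorem visB_pvMark (vis : Array Bool) (now x : Int)
    (hsz : vis.size = 100001) (h0 : 0 ≤ now) (h1 : now ≤ 100000) (hx : 0 ≤ x) :
    visB (pvMark vis now) x = if x = now then true else visB vis x := by
  have hne : ¬ now < 0 := by omega
  have hlt : now.toNat < vis.size := by omega
  by_cases hxe : x = now
  · subst hxe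
    have hx2 : x < 100001 := by omega
    simp only [visB, pvMark, hne, if_pos rfl]
    unfold Array.getD
    rw [dif_pos (by simp [hsz]; omega)]
    exact Array.getElem_setIfInBounds_self _
  · have hne2 : now.toNat ≠ x.toNat := by omega
    simp only [visB, pvMark, hne, if_neg hxe]
    unfold Array.getD
    by_cases hxlt : x.toNat < vis.size
    · rw [dif_pos (by simpa using hxlt), dif_pos hxlt]
      exact Array.getElem_setIfInBounds_ne hxlt hne2
    · rw [dif_neg (by simpa using hxlt), dif_neg hxlt]

theorem visB_replicate (x : Int) : visB (Array.replicate 100001 false) x = false := by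
  unfold visB Array.getD
  split <;> simp

-- membership in A's neighbour list
theorem mem_pvNbrsA {now y : Int} {vis : Array Bool} :
    y ∈ pvNbrsA now vis ↔
      ((y = now - 1 ∨ y = now + 1 ∨ y = now * 2) ∧ 0 ≤ y ∧ y < 100001 ∧ visB vis y = false) := by
  simp only [pvNbrsA, List.mem_filter, List.mem_cons,
    List.not_mem_nil, or_false, Bool.and_eq_true, decide_eq_true_eq,
    Bool.not_eq_eq_eq_not, Bool.not_true, visB]
  tauto

theorem length_pvNbrsA (now : Int) (vis : Array Bool) :
    (pvNbrsA now vis).length ≤ 3 := by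
  have := List.length_filter_le
    (fun s => decide (0 ≤ s) && decide (s < 100001) && !(vis.getD s.toNat false))
    [now - 1, now + 1, now * 2]
  simpa [pvNbrsA] using this

-- ---------- the BFS main lemma ----------

theorem bfs_main (N K : Int) (hN : 0 ≤ N) (hNK : N < K) (hK : K ≤ 100000) :
    ∀ (μ fuel : Nat) (fr nxt : List Int) (τ : Nat) (vis : Array Bool),
      2 * fuel + min nxt.length 1 ≤ μ →
      τ ≤ sInf {t | Reach N t K} →
      vis.size = 100001 →
      (∀ x : Int, 0 ≤ x → visB vis x = true → Reach N τ x) →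
      (∀ (t' : Nat) (x : Int), t' + 1 ≤ τ → Reach N t' x → visB vis x = true) →
      (∀ x ∈ fr, Reach N τ x) →
      (∀ y ∈ nxt, Reach N (τ + 1) y) →
      (∀ y, Reach N (τ + 1) y → Reach N τ y ∨ y ∈ nxt ∨ ∃ x ∈ fr, stepR x y) →
      (∀ y, Reach N τ y → visB vis y = true ∨ y ∈ fr) →
      visB vis K = false →
      fr.length * 4 ^ (sInf {t | Reach N t K} - τ + 1) + nxt.length * 4 ^ (sInf {t | Reach N t K} - τ) + 1 ≤ fuel →
      bfsL K fuel fr nxt (τ : Int) vis = some ((sInf {t | Reach N t K} : Nat) : Int) := by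
  have hwit : Reach N (K - N).toNat K := by
    have h0 := reach_upwalk hN (K - N).toNat (by omega)
    rwa [show N + (((K - N).toNat : Nat) : Int) = K from by omega] at h0
  have hDmem : Reach N (sInf {t | Reach N t K}) K :=
    Nat.sInf_mem (⟨_, hwit⟩ : {t | Reach N t K}.Nonempty)
  have hDle : ∀ t : Nat, Reach N t K → sInf {t | Reach N t K} ≤ t :=
    fun t ht => Nat.sInf_le ht
  intro μ
  induction μ using Nat.strong_induction_on with
  | _ μ ihμ =>
    intro fuel fr nxt τ vis hμ hτ hsz hvis1 hvis2 hfr hnxt hcomp hcover hKvis hfuel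
    obtain ⟨f, rfl⟩ : ∃ f, fuel = f + 1 := ⟨fuel - 1, by omega⟩
    rcases fr with _ | ⟨now, fr'⟩
    · rcases nxt with _ | ⟨nn, ns⟩
      · -- frontier and next frontier both empty: impossible
        exfalso
        rcases lt_or_eq_of_le hτ with hlt | heq
        · have hsub : ∀ y, Reach N (τ + 1) y → Reach N τ y := by
            intro y hy
            rcases hcomp y hy with h1 | h2 | ⟨z, hz, _⟩
            · exact h1
            · cases h2
            · cases hz
          have hKτ : Reach N τ K := by
            have := reach_stable hsub (sInf {t | Reach N t K} - τ) K
            apply this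
            rwa [show τ + (sInf {t | Reach N t K} - τ) = sInf {t | Reach N t K} from by omega]
          exact absurd (hDle τ hKτ) (by omega)
        · subst heq
          rcases hcover K hDmem with h1 | h1
          · rw [hKvis] at h1; cases h1
          · cases h1
      · -- level swap
        have hτD : τ < sInf {t | Reach N t K} := by
          rcases lt_or_eq_of_le hτ with hlt | heq
          · exact hlt
          · exfalso
            subst heq
            rcases hcover K hDmem with h1 | h1
            · rw [hKvis] at h1; cases h1
            · cases h1
        simp only [List.length_cons] at hμ
        rw [bfsL, show ((τ : Nat) : Int) + 1 = (((τ + 1 : Nat) : Nat) : Int) from by push_cast; ring]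
        apply ihμ (2 * (f + 1)) (by omega) (f + 1) (nn :: ns) [] (τ + 1) vis
        · simp
        · omega
        · exact hsz
        · intro x hx0 hx; exact Reach.stay (hvis1 x hx0 hx)
        · intro t' x ht' hx
          rcases Nat.lt_or_ge t' τ with h1 | h1
          · exact hvis2 t' x (by omega) hx
          · have : t' = τ := by omega
            subst this
            rcases hcover x hx with h2 | h2
            · exact h2
            · cases h2
        · exact hnxt
        · intro y hy; cases hy
        · intro y hy
          cases hy with
          | stay h' => exact Or.inl h'
          | succ hx hs =>
              rename_i x'
              rcases hcomp _ hx with h1 | h1 | ⟨z, hz, _⟩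
              · exact Or.inl (Reach.succ h1 hs)
              · exact Or.inr (Or.inr ⟨_, h1, hs⟩)
              · cases hz
        · intro y hy
          rcases hcomp y hy with h1 | h1 | ⟨z, hz, _⟩
          · rcases hcover y h1 with h2 | h2
            · exact Or.inl h2
            · cases h2
          · exact Or.inr h1
          · cases hz
        · exact hKvis
        · have he : sInf {t | Reach N t K} - (τ + 1) + 1 = sInf {t | Reach N t K} - τ := by
            omega
          rw [he]
          simpa using hfuel
    · -- pop
      rw [bfsL]
      by_cases hnowK : now = K
      · rw [if_pos hnowK]
        have hτD : sInf {t | Reach N t K} ≤ τ := hDle τ (hnowK ▸ hfr now (by simp))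
        have : τ = sInf {t | Reach N t K} := by omega
        rw [this]
      · rw [if_neg hnowK]
        have hnowR : Reach N τ now := hfr now (by simp)
        obtain ⟨hnow0, hnow1⟩ := reach_bounds hN (by omega) hnowR
        have hsz' : (pvMark vis now).size = 100001 := by rw [size_pvMark, hsz]
        have hv' : ∀ x : Int, 0 ≤ x →
            visB (pvMark vis now) x = if x = now then true else visB vis x :=
          fun x hx => visB_pvMark vis now x hsz hnow0 hnow1 hx
        show bfsL K f fr' (nxt ++ pvNbrsA now (pvMark vis now)) ((τ : Nat) : Int)
            (pvMark vis now) = _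
        apply ihμ (2 * f + 1) (by omega) f fr' (nxt ++ pvNbrsA now (pvMark vis now)) τ
          (pvMark vis now)
        · omega
        · exact hτ
        · exact hsz'
        · intro x hx0 hx
          rw [hv' x hx0] at hx
          by_cases hxe : x = now
          · subst hxe; exact hnowR
          · rw [if_neg hxe] at hx; exact hvis1 x hx0 hx
        · intro t' x ht' hx
          obtain ⟨hx0, _⟩ := reach_bounds hN (by omega) hx
          rw [hv' x hx0]
          by_cases hxe : x = now
          · simp [hxe]
          · rw [if_neg hxe]; exact hvis2 t' x ht' hx
        · intro x hx; exact hfr x (by simp [hx])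
        · intro y hy
          rcases List.mem_append.mp hy with h1 | h1
          · exact hnxt y h1
          · obtain ⟨hstep, hy0, hy1, _⟩ := mem_pvNbrsA.mp h1
            exact Reach.succ hnowR ⟨hstep, hy0, by omega⟩
        · intro y hy
          rcases hcomp y hy with h1 | h1 | ⟨z, hz, hs⟩
          · exact Or.inl h1
          · exact Or.inr (Or.inl (List.mem_append.mpr (Or.inl h1)))
          · rcases List.mem_cons.mp hz with h2 | h2
            · rw [h2] at hs
              obtain ⟨hy0, hy1⟩ : 0 ≤ y ∧ y ≤ 100000 := ⟨hs.2.1, hs.2.2⟩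
              by_cases hvy : visB (pvMark vis now) y = true
              · rw [hv' y hy0] at hvy
                by_cases hye : y = now
                · subst hye; exact Or.inl hnowR
                · rw [if_neg hye] at hvy
                  exact Or.inl (hvis1 y hy0 hvy)
              · refine Or.inr (Or.inl (List.mem_append.mpr (Or.inr ?_)))
                refine mem_pvNbrsA.mpr ⟨hs.1, hy0, by omega, ?_⟩
                simpa using hvy
            · exact Or.inr (Or.inr ⟨z, h2, hs⟩)
        · intro y hy
          obtain ⟨hy0, _⟩ := reach_bounds hN (by omega) hy
          rcases hcover y hy with h1 | h1
          · rw [hv' y hy0]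
            by_cases hye : y = now
            · simp [hye]
            · rw [if_neg hye]; exact Or.inl h1
          · rcases List.mem_cons.mp h1 with h2 | h2
            · subst h2
              rw [hv' y hy0]
              simp
            · exact Or.inr h2
        · rw [hv' K (by omega), if_neg (fun h => hnowK h.symm)]
          exact hKvis
        · have hlen := length_pvNbrsA now (pvMark vis now)
          have hpow : (4:Nat) ^ (sInf {t | Reach N t K} - τ + 1)
              = 4 ^ (sInf {t | Reach N t K} - τ) * 4 := pow_succ 4 _
          have hpow1 : 1 ≤ (4:Nat) ^ (sInf {t | Reach N t K} - τ) :=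
            Nat.one_le_pow _ _ (by norm_num)
          simp only [List.length_append, List.length_cons] at hfuel ⊢
          rw [add_mul (nxt.length) ((pvNbrsA now (pvMark vis now)).length)]
          rw [add_mul (fr'.length) 1, one_mul] at hfuel
          have h1 : (pvNbrsA now (pvMark vis now)).length * 4 ^ (sInf {t | Reach N t K} - τ)
              ≤ 3 * 4 ^ (sInf {t | Reach N t K} - τ) := Nat.mul_le_mul_right _ hlen
          omega

-- ---------- greedy spec function and its lemmas ----------

def gS (N : Int) (x : Int) : Int :=
  if x ≤ N then N - x
  else if x = N + 1 then 1
  else if x ≤ 1 then 0   -- unreachable when 0 ≤ N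
  else if x % 2 = 0 then min (x - N) (1 + gS N (x / 2))
  else 1 + min (gS N (x - 1)) (min (x + 1 - N) (1 + gS N ((x + 1) / 2)))
  termination_by x.toNat
  decreasing_by all_goals omega

theorem gS_nonneg (N : Int) (_hN : 0 ≤ N) : ∀ x : Int, 0 ≤ gS N x := by
  suffices H : ∀ (n : Nat) (x : Int), x.toNat ≤ n → 0 ≤ gS N x from fun x => H x.toNat x le_rfl
  intro n
  induction n using Nat.strong_induction_on with
  | _ n ih =>
    intro x hxn
    rw [gS]
    split_ifs with h1 h2 h3 h4
    · omega
    · omega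
    · omega
    · have hrec := ih (x/2).toNat (by omega) (x/2) le_rfl
      exact le_min (by omega) (by omega)
    · have h5 := ih (x-1).toNat (by omega) (x-1) le_rfl
      have h6 := ih ((x+1)/2).toNat (by omega) ((x+1)/2) le_rfl
      have h7 : 0 ≤ min (x + 1 - N) (1 + gS N ((x+1)/2)) := le_min (by omega) (by omega)
      have h8 := le_min h5 h7
      omega

-- Lipschitz property of gS
theorem gS_lip (N : Int) (hN : 0 ≤ N) :
    ∀ x : Int, gS N x ≤ gS N (x - 1) + 1 ∧ gS N x ≤ gS N (x + 1) + 1 := by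
  suffices H : ∀ (n : Nat) (x : Int), x.toNat ≤ n →
      (gS N x ≤ gS N (x - 1) + 1 ∧ gS N x ≤ gS N (x + 1) + 1) from fun x => H x.toNat x le_rfl
  intro n
  induction n using Nat.strong_induction_on with
  | _ n ih =>
    intro x hxn
    rcases le_or_gt x (N + 1) with hx1 | hx1
    · have hxm : gS N (x - 1) = N - (x - 1) := by rw [gS, if_pos (by omega)]
      rcases lt_or_eq_of_le hx1 with hx2 | hx2
      · have hx0 : gS N x = N - x := by rw [gS, if_pos (by omega)]
        rcases lt_or_eq_of_le (by omega : x ≤ N) with hx3 | hx3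
        · have hxp : gS N (x + 1) = N - (x + 1) := by rw [gS, if_pos (by omega)]
          omega
        · have hxp : gS N (x + 1) = 1 := by rw [gS, if_neg (by omega), if_pos (by omega)]
          omega
      · have hx0 : gS N x = 1 := by rw [gS, if_neg (by omega), if_pos (by omega)]
        have hnn := gS_nonneg N hN (x + 1)
        omega
    · by_cases hpar : x % 2 = 0
      · have hgx : gS N x = min (x - N) (1 + gS N (x / 2)) := by
          rw [gS, if_neg (by omega), if_neg (by omega), if_neg (by omega), if_pos hpar]
        constructor
        · rcases lt_or_eq_of_le (by omega : N + 1 ≤ x - 1) with ho | ho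
          · have hgx1 : gS N (x - 1)
                = 1 + min (gS N (x - 2)) (min (x - N) (1 + gS N (x / 2))) := by
              rw [gS, if_neg (by omega), if_neg (by omega), if_neg (by omega),
                if_neg (by omega)]
              rw [show x - 1 - 1 = x - 2 from by ring, show x - 1 + 1 = x from by ring]
            have hb : min (x - N) (1 + gS N (x / 2)) ≤ 2 + gS N (x - 2) := by
              rcases lt_or_eq_of_le (by omega : N + 1 ≤ x - 2) with ho2 | ho2
              · have hgx2 : gS N (x - 2) = min (x - 2 - N) (1 + gS N (x / 2 - 1)) := by
                  rw [gS, if_neg (by omega), if_neg (by omega), if_neg (by omega),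
                    if_pos (by omega)]
                  rw [show (x - 2) / 2 = x / 2 - 1 from by omega]
                have hIH := (ih (x / 2).toNat (by omega) (x / 2) le_rfl).1
                omega
              · have hgx2 : gS N (x - 2) = 1 := by
                  rw [gS, if_neg (by omega), if_pos (by omega)]
                omega
            omega
          · have hgx1 : gS N (x - 1) = 1 := by rw [gS, if_neg (by omega), if_pos (by omega)]
            omega
        · have hgx1 : gS N (x + 1)
              = 1 + min (gS N x) (min (x + 2 - N) (1 + gS N (x / 2 + 1))) := by
            rw [gS, if_neg (by omega), if_neg (by omega), if_neg (by omega),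
              if_neg (by omega)]
            rw [show x + 1 - 1 = x from by ring, show x + 1 + 1 = x + 2 from by ring,
              show (x + 2) / 2 = x / 2 + 1 from by omega]
          have hIH := (ih (x / 2).toNat (by omega) (x / 2) le_rfl).2
          omega
      · have hgx : gS N x
            = 1 + min (gS N (x - 1)) (min (x + 1 - N) (1 + gS N ((x + 1) / 2))) := by
          rw [gS, if_neg (by omega), if_neg (by omega), if_neg (by omega), if_neg hpar]
        constructor
        · omega
        · have hgx1 : gS N (x + 1) = min (x + 1 - N) (1 + gS N ((x + 1) / 2)) := by
            rw [gS, if_neg (by omega), if_neg (by omega), if_neg (by omega),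
              if_pos (by omega)]
          omega

theorem gS_double (N : Int) (hN : 0 ≤ N) (x : Int) (hx : 0 ≤ x) :
    gS N (x * 2) ≤ gS N x + 1 := by
  have hnn := gS_nonneg N hN x
  rcases le_or_gt (x * 2) N with h | h
  · have hxN : x ≤ N := by omega
    rw [gS, if_pos h, gS, if_pos hxN]
    omega
  · rcases lt_or_eq_of_le (by omega : N + 1 ≤ x * 2) with h3 | h3
    · rw [gS, if_neg (by omega), if_neg (by omega), if_neg (by omega), if_pos (by omega)]
      have hdiv : x * 2 / 2 = x := by omega
      rw [hdiv]
      exact le_trans (min_le_right _ _) (by omega)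
    · rw [gS, if_neg (by omega), if_pos (by omega)]
      omega

theorem gS_step (N : Int) (hN : 0 ≤ N) (x y : Int) (hx : 0 ≤ x) (hs : stepR x y) :
    gS N y ≤ gS N x + 1 := by
  obtain ⟨hy, hy0, hy1⟩ := hs
  rcases hy with h1 | h1 | h1 <;> subst h1
  · have hl := (gS_lip N hN (x - 1)).2
    rw [show x - 1 + 1 = x from by ring] at hl
    omega
  · have hl := (gS_lip N hN (x + 1)).1
    rw [show x + 1 - 1 = x from by ring] at hl
    omega
  · have hl := gS_double N hN x hx
    omega

theorem gS_le_reach {N : Int} (hN : 0 ≤ N) (hN1 : N ≤ 100000) {t : Nat} {x : Int}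
    (h : Reach N t x) : gS N x ≤ t := by
  induction h with
  | zero => rw [gS, if_pos le_rfl]; omega
  | stay _ ih => push_cast; push_cast at ih; omega
  | succ h hs ih =>
      have hx0 := (reach_bounds hN hN1 h).1
      have h5 := gS_step N hN _ _ hx0 hs
      push_cast
      push_cast at ih
      omega

theorem reach_gS {N : Int} (hN : 0 ≤ N) (hN1 : N ≤ 100000) :
    ∀ x : Int, N < x → x ≤ 100000 → Reach N (gS N x).toNat x := by
  suffices H : ∀ (n : Nat) (x : Int), x.toNat ≤ n → N < x → x ≤ 100000 →
      Reach N (gS N x).toNat x from fun x => H x.toNat x le_rfl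
  intro n
  induction n using Nat.strong_induction_on with
  | _ n ih =>
    intro x hxn hNx hx1
    rcases lt_or_eq_of_le (by omega : N + 1 ≤ x) with hx2 | hx2
    case inr =>
      have hg : gS N x = 1 := by rw [gS, if_neg (by omega), if_pos (by omega)]
      rw [hg, show ((1:Int)).toNat = 1 from rfl]
      exact Reach.succ Reach.zero ⟨Or.inr (Or.inl (by omega)), by omega, by omega⟩
    case inl =>
    by_cases hpar : x % 2 = 0
    · have hg : gS N x = min (x - N) (1 + gS N (x / 2)) := by
        rw [gS, if_neg (by omega), if_neg (by omega), if_neg (by omega), if_pos hpar]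
      rcases le_or_gt (x - N) (1 + gS N (x / 2)) with hc | hc
      · have hgv : gS N x = x - N := by rw [hg]; exact min_eq_left hc
        rw [hgv]
        have hr := reach_upwalk hN (x - N).toNat (by omega)
        rwa [show N + (((x - N).toNat : Nat) : Int) = x from by omega] at hr
      · have hgv : gS N x = 1 + gS N (x / 2) := by rw [hg]; exact min_eq_right (by omega)
        have hstep : stepR (x / 2) x := ⟨Or.inr (Or.inr (by omega)), by omega, by omega⟩
        rcases le_or_gt (x / 2) N with hh | hh
        · have hgv2 : gS N (x / 2) = N - x / 2 := by rw [gS, if_pos hh]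
          have hr := reach_downwalk hN hN1 (N - x / 2).toNat (by omega)
          rw [show N - (((N - x / 2).toNat : Nat) : Int) = x / 2 from by omega] at hr
          have h2 := Reach.succ hr hstep
          rw [hgv, hgv2, show (1 + (N - x / 2)).toNat = (N - x / 2).toNat + 1 from by omega]
          exact h2
        · have hr := ih (x / 2).toNat (by omega) (x / 2) le_rfl hh (by omega)
          have h2 := Reach.succ hr hstep
          have hnn := gS_nonneg N hN (x / 2)
          rw [hgv, show (1 + gS N (x / 2)).toNat = (gS N (x / 2)).toNat + 1 from by omega]
          exact h2
    · have hg : gS N x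
          = 1 + min (gS N (x - 1)) (min (x + 1 - N) (1 + gS N ((x + 1) / 2))) := by
        rw [gS, if_neg (by omega), if_neg (by omega), if_neg (by omega), if_neg hpar]
      have hx3 : 3 ≤ x := by omega
      have hx99 : x ≤ 99999 := by omega
      have hna := gS_nonneg N hN (x - 1)
      have hnc := gS_nonneg N hN ((x + 1) / 2)
      rcases le_or_gt (gS N (x - 1)) (min (x + 1 - N) (1 + gS N ((x + 1) / 2))) with h1 | h1
      · have hgv : gS N x = 1 + gS N (x - 1) := by rw [hg, min_eq_left h1]
        have hm1 : (x - 1).toNat < n := by omega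
        have hr := ih (x - 1).toNat hm1 (x - 1) le_rfl (by omega) (by omega)
        have h2 := Reach.succ hr (show stepR (x - 1) x from ⟨Or.inr (Or.inl (by omega)), by omega, by omega⟩)
        rw [hgv, show (1 + gS N (x - 1)).toNat = (gS N (x - 1)).toNat + 1 from by omega]
        exact h2
      · rcases le_or_gt (x + 1 - N) (1 + gS N ((x + 1) / 2)) with h2 | h2
        · have hgv : gS N x = 1 + (x + 1 - N) := by
            rw [hg, min_eq_right (by omega), min_eq_left h2]
          have hr := reach_upwalk hN (x + 1 - N).toNat (by omega)
          rw [show N + (((x + 1 - N).toNat : Nat) : Int) = x + 1 from by omega] at hr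
          have h3 := Reach.succ hr (show stepR (x + 1) x from ⟨Or.inl (by omega), by omega, by omega⟩)
          rw [hgv, show (1 + (x + 1 - N)).toNat = (x + 1 - N).toNat + 1 from by omega]
          exact h3
        · have hgv : gS N x = 1 + (1 + gS N ((x + 1) / 2)) := by
            rw [hg, min_eq_right (by omega), min_eq_right (by omega)]
          have hstep2 : stepR ((x + 1) / 2) (x + 1) :=
            ⟨Or.inr (Or.inr (by omega)), by omega, by omega⟩
          have hstep3 : stepR (x + 1) x := ⟨Or.inl (by omega), by omega, by omega⟩
          have hmid : Reach N ((gS N ((x + 1) / 2)).toNat + 1) (x + 1) := by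
            rcases le_or_gt ((x + 1) / 2) N with hh | hh
            · have hgv2 : gS N ((x + 1) / 2) = N - (x + 1) / 2 := by rw [gS, if_pos hh]
              have hr := reach_downwalk hN hN1 (N - (x + 1) / 2).toNat (by omega)
              rw [show N - (((N - (x + 1) / 2).toNat : Nat) : Int) = (x + 1) / 2 from by omega] at hr
              have h3 := Reach.succ hr hstep2
              rw [hgv2, show (N - (x + 1) / 2).toNat = ((N - (x+1)/2).toNat : Nat) from rfl]
              rw [show (N - (x + 1) / 2).toNat + 1 = (N - (x + 1) / 2).toNat + 1 from rfl]
              exact h3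
            · have hr := ih ((x + 1) / 2).toNat (by omega) ((x + 1) / 2) le_rfl hh (by omega)
              exact Reach.succ hr hstep2
          have h4 := Reach.succ hmid hstep3
          rw [hgv, show (1 + (1 + gS N ((x + 1) / 2))).toNat
              = (gS N ((x + 1) / 2)).toNat + 1 + 1 from by omega]
          exact h4

-- gB computes gS with enough fuel
theorem gB_eq_gS (N : Int) (hN : 0 ≤ N) :
    ∀ x : Int, N < x → ∀ fuel : Nat, 2 * x.toNat + 2 ≤ fuel →
      gB N fuel x = some (gS N x) := by
  suffices H : ∀ (n : Nat) (x : Int), x.toNat ≤ n → N < x → ∀ fuel, 2 * x.toNat + 2 ≤ fuel →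
      gB N fuel x = some (gS N x) from fun x hx fuel hf => H x.toNat x le_rfl hx fuel hf
  intro n
  induction n using Nat.strong_induction_on with
  | _ n ih =>
    intro x hxn hNx fuel hfuel
    obtain ⟨f, rfl⟩ : ∃ f, fuel = f + 1 := ⟨fuel - 1, by omega⟩
    rcases lt_or_eq_of_le (by omega : N + 1 ≤ x) with hx2 | hx2
    case inr =>
      simp only [gB, if_neg (by omega : ¬ x ≤ N), if_pos (by omega : x = N + 1)]
      rw [gS, if_neg (by omega), if_pos (by omega)]
    case inl =>
      have hx0 : 2 ≤ x := by omega
      by_cases hpar : x % 2 = 0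
      · have hhalf : gB N f (x / 2) = some (gS N (x / 2)) := by
          rcases le_or_gt (x / 2) N with hh | hh
          · obtain ⟨f2, rfl⟩ : ∃ f2, f = f2 + 1 := ⟨f - 1, by omega⟩
            simp only [gB, if_pos hh]
            rw [gS, if_pos hh]
          · exact ih (x / 2).toNat (by omega) (x / 2) le_rfl hh f (by omega)
        simp only [gB, if_neg (by omega : ¬ x ≤ N), if_neg (by omega : ¬ x = N + 1),
          if_pos hpar, hhalf, Option.map_some]
        conv_rhs => rw [gS]
        rw [if_neg (by omega : ¬ x ≤ N), if_neg (by omega : ¬ x = N + 1),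
          if_neg (by omega : ¬ x ≤ 1), if_pos hpar]
      · have hm : gB N f (x - 1) = some (gS N (x - 1)) :=
          ih (x - 1).toNat (by omega) (x - 1) le_rfl (by omega) f (by omega)
        have hgsp : gS N (x + 1) = min (x + 1 - N) (1 + gS N ((x + 1) / 2)) := by
          rw [gS, if_neg (by omega), if_neg (by omega), if_neg (by omega),
            if_pos (by omega)]
        have hp : gB N f (x + 1) = some (gS N (x + 1)) := by
          obtain ⟨f2, rfl⟩ : ∃ f2, f = f2 + 1 := ⟨f - 1, by omega⟩
          have hh2 : gB N f2 ((x + 1) / 2) = some (gS N ((x + 1) / 2)) := by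
            rcases le_or_gt ((x + 1) / 2) N with hh | hh
            · obtain ⟨f3, rfl⟩ : ∃ f3, f2 = f3 + 1 := ⟨f2 - 1, by omega⟩
              simp only [gB, if_pos hh]
              rw [gS, if_pos hh]
            · exact ih ((x + 1) / 2).toNat (by omega) ((x + 1) / 2) le_rfl hh f2 (by omega)
          simp only [gB, if_neg (by omega : ¬ x + 1 ≤ N), if_neg (by omega : ¬ x + 1 = N + 1),
            if_pos (by omega : (x + 1) % 2 = 0), hh2, Option.map_some]
          rw [hgsp]
          
        simp only [gB, if_neg (by omega : ¬ x ≤ N), if_neg (by omega : ¬ x = N + 1),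
          if_neg hpar, hm, hp, Option.bind_some, Option.map_some]
        conv_rhs => rw [gS]
        rw [if_neg (by omega : ¬ x ≤ N), if_neg (by omega : ¬ x = N + 1),
          if_neg (by omega : ¬ x ≤ 1), if_neg hpar, hgsp]

-- ===== VERDICT (by name: the statement is the Claim_ definition above) =====
theorem find_fastest_way_spec : Claim_equal_find_fastest_way := by
  intro N K _ hpre
  unfold Spec_find_fastest_way find_fastest_way find_fastest_way_alt
  by_cases h : N ≥ K
  · simp [h]
  · simp only [h, if_false]
    have hNK : N < K := by omega
    have hN : 0 ≤ N := by rcases hpre with h' | h' <;> [omega; exact h'.1]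
    have hK : K ≤ 100000 := by rcases hpre with h' | h' <;> [omega; exact h'.2]
    -- reachability witness and distance
    have hwit : Reach N (K - N).toNat K := by
      have := reach_upwalk hN (K - N).toNat (by omega)
      have he : N + ((K - N).toNat : Int) = K := by omega
      rwa [he] at this
    have hex : ∃ t, Reach N t K := ⟨_, hwit⟩
    have hdle : sInf {t | Reach N t K} ≤ 100000 := le_trans (Nat.sInf_le (show (K - N).toNat ∈ {t | Reach N t K} from hwit)) (by omega)
    -- A side
    have hA : bfsA K (4 ^ 100002) [(N, 0)] [] (Array.replicate 100001 false)
        = some ((sInf {t | Reach N t K} : Nat) : Int) := by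
      rw [bfsA_eq]
      have : ([(N, 0)] : List (Int × Int)) ++ ([] : List (Int × Int)).reverse
          = ([N].map (fun s => (s, (0:Int))) ++ ([] : List Int).map (fun s => (s, (0:Int) + 1))) := by
        simp
      rw [this, main_bisim]
      refine bfs_main N K hN hNK hK (2 * 4 ^ 100002 + 1) (4 ^ 100002) [N] [] 0
        (Array.replicate 100001 false) ?_ ?_ ?_ ?_ ?_ ?_ ?_ ?_ ?_ ?_ ?_
      · simp
      · exact Nat.zero_le _
      · simp
      · intro x _ hx; rw [visB_replicate] at hx; cases hx
      · intro t' x ht' _; exact absurd ht' (by omega)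
      · intro x hx
        simp at hx; subst hx; exact Reach.zero
      · intro y hy; cases hy
      · intro y hy
        cases hy with
        | stay h' => exact Or.inl h'
        | succ h' hs =>
            cases h' with
            | zero => exact Or.inr (Or.inr ⟨N, by simp, hs⟩)
      · intro y hy
        cases hy with
        | zero => right; simp
      · rw [visB_replicate]
      · have h1 : sInf {t | Reach N t K} - 0 + 1 ≤ 100001 := by omega
        calc 1 * 4 ^ (sInf {t | Reach N t K} - 0 + 1) + 0 * 4 ^ (sInf {t | Reach N t K} - 0) + 1
            ≤ 4 ^ 100001 + 1 := by
              have := Nat.pow_le_pow_right (by norm_num : 1 ≤ 4) h1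
              simpa using this
          _ ≤ 4 ^ 100002 := by
              have : (4:Nat) ^ 100002 = 4 ^ 100001 * 4 := by
                rw [show (100002:ℕ) = 100001 + 1 from rfl, pow_succ]
              have h2 : 1 ≤ (4:Nat) ^ 100001 := Nat.one_le_pow _ _ (by norm_num)
              omega
    -- B side
    have hB : gB N (2 * K + 6).toNat K = some (gS N K) := by
      apply gB_eq_gS N hN K hNK
      omega
    -- gS equals the distance
    have hgd : gS N K = ((sInf {t | Reach N t K} : Nat) : Int) := by
      have hle : gS N K ≤ (((sInf {t | Reach N t K} : Nat)) : Int) := gS_le_reach hN (by omega) (Nat.sInf_mem (⟨_, hwit⟩ : {t | Reach N t K}.Nonempty))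
      have hge : sInf {t | Reach N t K} ≤ (gS N K).toNat := Nat.sInf_le (show (gS N K).toNat ∈ {t | Reach N t K} from reach_gS hN (by omega) K hNK hK)
      have hnn : 0 ≤ gS N K := gS_nonneg N hN K
      omega
    rw [hA, hB, hgd]
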